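/- GENERATED by farm/mkstatement.py from design/units.tsv (unit `vorbis_deinit.COMPOSITION`) and the Specs of Vorbis/Spec/*.lean — do not edit.
   THE STATEMENT of the proof unit `vorbis_deinit.COMPOSITION`: the function `vorbis_deinit` (248 instructions) satisfies its contract,
   GIVEN THE STATEMENTS OF ITS 4 SEGMENTS (`Vorbis.Spec.vorbis_deinit.Seg<k> Lay μ u₀`: what the unit `vorbis_deinit.<k>` proves).
   No machine code is walked: `ReachVia.trans` along the segments (the exit assertion of a segment is the entry assertion of
   its successor), an induction on the loop measures. What the names mean: Vorbis/Spec/Basic.lean. The theorem to prove: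
   `theorem vorbis_deinit_COMPOSITION_ok : Vorbis.Spec.vorbis_deinit_COMPOSITION.Statement`. -/
import Vorbis.Spec.Alloc
namespace Vorbis.Spec.vorbis_deinit_COMPOSITION
open X86 X86.User Asan

/-- The statement of unit `vorbis_deinit.COMPOSITION`. -/
def Statement : Prop :=
  ∀ (Lay : Layout) (_hLay : Lay.hi = 0x1000000) (μ : Microarch) (_hμ : UserX.MicroOK μ) (u₀ : State)
    (_h_vorbis_deinit_1 : Vorbis.Spec.vorbis_deinit.Seg1 Lay μ u₀)
    (_h_vorbis_deinit_2 : Vorbis.Spec.vorbis_deinit.Seg2 Lay μ u₀)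
    (_h_vorbis_deinit_3 : Vorbis.Spec.vorbis_deinit.Seg3 Lay μ u₀)
    (_h_vorbis_deinit_4 : Vorbis.Spec.vorbis_deinit.Seg4 Lay μ u₀),
    ∀ (others : List Obj) (frames : List (Nat × FrameLayout)) (Blk : Block → Prop), Calls Lay μ Vorbis.WayInv (Vorbis.conv u₀) Vorbis.L.vorbis_deinit.entry (Vorbis.Spec.vorbis_deinit.spec others frames Blk)

end Vorbis.Spec.vorbis_deinit_COMPOSITION
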